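-- pv_equiv track=rewrite | github.com/hatzel/salsa-standoff-annotations | main.py | text_from_tokens
-- ===== SOURCE A (Python) =====
-- from typing import Dict, List, Set, Tuple
--
-- def sentence_from_tokens(
--     tokens: List[str], pos_list: List[str]
-- ) -> Tuple[str, List[Tuple[int, int]]]:
--     """
--     Apply some heuristics to create a sensible text text from the tokens.
--
--     Unfortunately the original whitespace information is not available.
--     """
--     assert len(tokens) == len(pos_list)
--     token_list = []
--     out = ""
--     for i, (token, pos) in enumerate(zip(tokens, pos_list)):
--         if i < len(tokens) - 1:
--             next_token = tokens[i + 1]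
--             next_pos = pos_list[i + 1]
--         else:
--             next_token = None
--             next_pos = None
--         token_list.append(tuple([len(out), len(out) + len(token)]))
--         if (
--             next_pos in ["$.", "$,"]
--             or token in ["``", "(", "/"]
--             or next_token in ["''", ")", "/"]
--             or next_token is None
--         ):
--             out += token
--         else:
--             out += token + " "
--     return out, token_list
--
-- def text_from_tokens(
--     sentences: List[List[str]], pos_lists: List[List[str]]
-- ) -> Tuple[str, List[List[Tuple[int, int]]]]:
--     text = ""
--     token_list = []
--     for sent_tokens, sent_pos in zip(sentences, pos_lists):
--         sentence, sent_token_spec = sentence_from_tokens(sent_tokens, sent_pos)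
--         if len(text) != 0:
--             add_whitespace = 1
--         else:
--             add_whitespace = 0
--         sent_token_spec = [
--             tuple(
--                 [
--                     span[0] + len(text) + add_whitespace,
--                     span[1] + len(text) + add_whitespace,
--                 ]
--             )
--             for span in sent_token_spec
--         ]
--         token_list.append(sent_token_spec)
--         text += (" " * add_whitespace) + sentence
--     return text, token_list
-- ===== SOURCE B (Python) =====
-- def text_from_tokens(sentences, pos_lists):
--     parts = []
--     offset = 0
--     all_spans = []
--     for tokens, pos_list in zip(sentences, pos_lists):
--         if offset > 0:
--             parts.append(" ")
--             offset += 1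
--         pairs = list(zip(tokens, pos_list))
--         spans = []
--         for i, (token, pos) in enumerate(pairs):
--             spans.append((offset, offset + len(token)))
--             parts.append(token)
--             offset += len(token)
--             if i + 1 < len(pairs):
--                 next_token, next_pos = pairs[i + 1]
--                 if not (
--                     next_pos in ("$.", "$,")
--                     or token in ("``", "(", "/")
--                     or next_token in ("''", ")", "/")
--                 ):
--                     parts.append(" ")
--                     offset += 1
--         all_spans.append(spans)
--     return "".join(parts), all_spans
-- ===== Notes on version B (the rewrite author's own statement) =====
-- stated objective: alternative
-- what changed: Single merged pass with a running absolute offset and a list-of-parts accumulator joined once at the end, recording each span directly at its absolute position, so the per-sentence relative-span helper and the shifting comprehension disappear; Pre_ excludes inputs where some zipped sentence has unequally many tokens and POS tags, on which A's assert raises AssertionError.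
import Mathlib
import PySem

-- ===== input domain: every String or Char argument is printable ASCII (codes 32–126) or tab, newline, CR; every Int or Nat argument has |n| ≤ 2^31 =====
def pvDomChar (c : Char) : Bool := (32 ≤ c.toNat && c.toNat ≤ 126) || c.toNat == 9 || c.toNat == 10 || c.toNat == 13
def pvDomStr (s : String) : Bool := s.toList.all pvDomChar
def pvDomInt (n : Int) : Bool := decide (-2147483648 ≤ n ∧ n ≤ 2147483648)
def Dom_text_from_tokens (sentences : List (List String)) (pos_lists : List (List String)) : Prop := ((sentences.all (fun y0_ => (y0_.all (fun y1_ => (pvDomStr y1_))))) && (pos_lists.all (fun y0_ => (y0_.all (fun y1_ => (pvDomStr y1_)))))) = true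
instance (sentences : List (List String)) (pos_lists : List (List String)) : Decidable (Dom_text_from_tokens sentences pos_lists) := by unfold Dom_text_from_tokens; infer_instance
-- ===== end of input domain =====

-- B replaces A's per-sentence relative-span helper + shifting comprehension + repeated string
-- concatenation by ONE merged pass holding a running absolute offset and a list of string parts
-- joined once at the end (objective: alternative decomposition of the same computation).

-- ===== PORT A =====
-- the loop of sentence_from_tokens: state (token_list, out); the Python reads tokens[i+1] /
-- pos_list[i+1] under the guard i < len(tokens) - 1, which (lengths being equal, per the assert
-- that Pre_ guarantees) is exactly the head of the remaining zipped list.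
def sftLoop : List (String × String) → String → List (Int × Int) → List (Int × Int) × String
  | [], out, acc => (acc, out)
  | (token, _pos) :: rest, out, acc =>
      let next_token : Option String := rest.head?.map Prod.fst
      let next_pos : Option String := rest.head?.map Prod.snd
      let acc' := acc ++ [(PySem.Str.len out, PySem.Str.len out + PySem.Str.len token)]
      if next_pos = some "$." ∨ next_pos = some "$," ∨
         token = "``" ∨ token = "(" ∨ token = "/" ∨
         next_token = some "''" ∨ next_token = some ")" ∨ next_token = some "/" ∨
         next_token = none
      then sftLoop rest (out ++ token) acc'
      else sftLoop rest (out ++ token ++ " ") acc'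

def sentence_from_tokens (tokens : List String) (pos_list : List String) : String × List (Int × Int) :=
  let r := sftLoop (tokens.zip pos_list) "" []
  (r.2, r.1)

def tftLoop : List (List String × List String) → String → List (List (Int × Int)) → String × List (List (Int × Int))
  | [], text, token_list => (text, token_list)
  | (sent_tokens, sent_pos) :: rest, text, token_list =>
      let r := sentence_from_tokens sent_tokens sent_pos
      let add_whitespace : Int := if PySem.Str.len text ≠ 0 then 1 else 0
      let spec := r.2.map (fun span =>
        (span.1 + PySem.Str.len text + add_whitespace, span.2 + PySem.Str.len text + add_whitespace))
      tftLoop rest (text ++ (if add_whitespace = 1 then " " else "") ++ r.1) (token_list ++ [spec])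

def text_from_tokens (sentences : List (List String)) (pos_lists : List (List String)) : String × (List (List (Int × Int))) :=
  tftLoop (sentences.zip pos_lists) "" []

-- ===== PORT B =====
-- merged pass: (parts so far, running offset, spans of the current sentence)
def altInner : List (String × String) → Int → List String × Int × List (Int × Int)
  | [], offset => ([], offset, [])
  | (token, _pos) :: rest, offset =>
      let span : Int × Int := (offset, offset + PySem.Str.len token)
      match rest.head? with
      | none =>
          let r := altInner rest (offset + PySem.Str.len token)
          (token :: r.1, r.2.1, span :: r.2.2)
      | some (next_token, next_pos) =>
          if next_pos = "$." ∨ next_pos = "$," ∨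
             token = "``" ∨ token = "(" ∨ token = "/" ∨
             next_token = "''" ∨ next_token = ")" ∨ next_token = "/"
          then
            let r := altInner rest (offset + PySem.Str.len token)
            (token :: r.1, r.2.1, span :: r.2.2)
          else
            let r := altInner rest (offset + PySem.Str.len token + 1)
            (token :: " " :: r.1, r.2.1, span :: r.2.2)

def altOuter : List (List String × List String) → List String → Int → List (List (Int × Int)) → List String × List (List (Int × Int))
  | [], parts, _offset, all_spans => (parts, all_spans)
  | (tokens, pos_list) :: rest, parts, offset, all_spans =>
      let parts1 := if offset > 0 then parts ++ [" "] else parts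
      let offset1 := if offset > 0 then offset + 1 else offset
      let r := altInner (tokens.zip pos_list) offset1
      altOuter rest (parts1 ++ r.1) r.2.1 (all_spans ++ [r.2.2])

def text_from_tokens_alt (sentences : List (List String)) (pos_lists : List (List String)) : String × (List (List (Int × Int))) :=
  let r := altOuter (sentences.zip pos_lists) [] 0 []
  (PySem.Str.join "" r.1, r.2)

-- ===== PRECONDITION & SPEC =====
-- Pre_ excludes exactly the inputs on which A's per-sentence assert fires (AssertionError):
-- a zipped sentence whose token list and POS list have different lengths.
def Pre_text_from_tokens (sentences : List (List String)) (pos_lists : List (List String)) : Prop :=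
  ∀ p ∈ sentences.zip pos_lists, p.1.length = p.2.length
instance (sentences : List (List String)) (pos_lists : List (List String)) : Decidable (Pre_text_from_tokens sentences pos_lists) := by unfold Pre_text_from_tokens; infer_instance

def pvWitness_text_from_tokens : List (List String) × List (List String) :=
  ([["Hello", "world", "."], ["(", "Again", ")"]], [["X", "Y", "$."], ["Z", "W", "V"]])

def Spec_text_from_tokens (sentences : List (List String)) (pos_lists : List (List String)) (out : String × (List (List (Int × Int)))) : Prop := out = text_from_tokens_alt sentences pos_lists
instance (sentences : List (List String)) (pos_lists : List (List String)) (out : String × (List (List (Int × Int)))) : Decidable (Spec_text_from_tokens sentences pos_lists out) := by unfold Spec_text_from_tokens; infer_instance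

-- ===== CLAIM (what is proved, stated in full; the proofs are below) =====
def Claim_equal_text_from_tokens : Prop := ∀ (sentences : List (List String)) (pos_lists : List (List String)), Dom_text_from_tokens sentences pos_lists → Pre_text_from_tokens sentences pos_lists → Spec_text_from_tokens sentences pos_lists (text_from_tokens sentences pos_lists)

-- ===== LEMMAS AND PROOFS =====

lemma joinE_nil : PySem.Str.join "" ([] : List String) = "" := by decide

lemma joinE_cons (x : String) (ps : List String) :
    PySem.Str.join "" (x :: ps) = x ++ PySem.Str.join "" ps := by
  cases ps with
  | nil => simp [PySem.Str.join, PySem.Chars.join_singleton, PySem.Chars.join_nil]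
  | cons y t =>
      show String.ofList (PySem.Chars.join [] (x.toList :: y.toList :: t.map String.toList)) = _
      rw [PySem.Chars.join_cons_cons]
      simp [PySem.Str.join]

lemma joinE_append (xs ys : List String) :
    PySem.Str.join "" (xs ++ ys) = PySem.Str.join "" xs ++ PySem.Str.join "" ys := by
  induction xs with
  | nil => simp [joinE_nil]
  | cons x t ih => simp [joinE_cons, ih, String.append_assoc]

lemma len_empty : PySem.Str.len "" = 0 := by decide

-- controlled one-step unfoldings of the two loops (the definitions reduce to these)
lemma sftLoop_single (token pos : String) (out : String) (acc : List (Int × Int)) :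
    sftLoop [(token, pos)] out acc =
      (acc ++ [(PySem.Str.len out, PySem.Str.len out + PySem.Str.len token)], out ++ token) := by
  show (if (none : Option String) = some "$." ∨ (none : Option String) = some "$," ∨
        token = "``" ∨ token = "(" ∨ token = "/" ∨
        (none : Option String) = some "''" ∨ (none : Option String) = some ")" ∨
        (none : Option String) = some "/" ∨ (none : Option String) = none
      then sftLoop [] (out ++ token)
        (acc ++ [(PySem.Str.len out, PySem.Str.len out + PySem.Str.len token)])
      else sftLoop [] (out ++ token ++ " ")
        (acc ++ [(PySem.Str.len out, PySem.Str.len out + PySem.Str.len token)])) = _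
  rw [if_pos (by simp)]
  rfl

lemma sftLoop_cons_cons (token pos nt np : String) (rest2 : List (String × String))
    (out : String) (acc : List (Int × Int)) :
    sftLoop ((token, pos) :: (nt, np) :: rest2) out acc =
      if np = "$." ∨ np = "$," ∨ token = "``" ∨ token = "(" ∨ token = "/" ∨
         nt = "''" ∨ nt = ")" ∨ nt = "/"
      then sftLoop ((nt, np) :: rest2) (out ++ token)
        (acc ++ [(PySem.Str.len out, PySem.Str.len out + PySem.Str.len token)])
      else sftLoop ((nt, np) :: rest2) (out ++ token ++ " ")
        (acc ++ [(PySem.Str.len out, PySem.Str.len out + PySem.Str.len token)]) := by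
  show (if (some np : Option String) = some "$." ∨ (some np : Option String) = some "$," ∨
        token = "``" ∨ token = "(" ∨ token = "/" ∨
        (some nt : Option String) = some "''" ∨ (some nt : Option String) = some ")" ∨
        (some nt : Option String) = some "/" ∨ (some nt : Option String) = none
      then _ else _) = _
  by_cases c : np = "$." ∨ np = "$," ∨ token = "``" ∨ token = "(" ∨ token = "/" ∨
      nt = "''" ∨ nt = ")" ∨ nt = "/"
  · rw [if_pos (by simpa using c), if_pos c]
  · rw [if_neg (by simpa using c), if_neg c]

lemma altInner_nil (o : Int) : altInner [] o = ([], o, []) := rfl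

lemma altInner_single (token pos : String) (o : Int) :
    altInner [(token, pos)] o =
      ([token], o + PySem.Str.len token, [(o, o + PySem.Str.len token)]) := rfl

lemma altInner_cons_cons (token pos nt np : String) (rest2 : List (String × String)) (o : Int) :
    altInner ((token, pos) :: (nt, np) :: rest2) o =
      if np = "$." ∨ np = "$," ∨ token = "``" ∨ token = "(" ∨ token = "/" ∨
         nt = "''" ∨ nt = ")" ∨ nt = "/"
      then (token :: (altInner ((nt, np) :: rest2) (o + PySem.Str.len token)).1,
            (altInner ((nt, np) :: rest2) (o + PySem.Str.len token)).2.1,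
            (o, o + PySem.Str.len token) ::
              (altInner ((nt, np) :: rest2) (o + PySem.Str.len token)).2.2)
      else (token :: " " :: (altInner ((nt, np) :: rest2) (o + PySem.Str.len token + 1)).1,
            (altInner ((nt, np) :: rest2) (o + PySem.Str.len token + 1)).2.1,
            (o, o + PySem.Str.len token) ::
              (altInner ((nt, np) :: rest2) (o + PySem.Str.len token + 1)).2.2) := rfl

-- sftLoop relative/absolute: running it from (out, acc) is running it from ("", []) shifted
lemma sftLoop_shift (z : List (String × String)) : ∀ (out : String) (acc : List (Int × Int)),
    sftLoop z out acc =
      (acc ++ (sftLoop z "" []).1.map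
          (fun s => (s.1 + PySem.Str.len out, s.2 + PySem.Str.len out)),
       out ++ (sftLoop z "" []).2) := by
  induction z with
  | nil => intro out acc; simp [sftLoop]
  | cons hd rest ih =>
      intro out acc
      obtain ⟨token, pos⟩ := hd
      by_cases c : (rest.head?.map Prod.snd) = some "$." ∨ (rest.head?.map Prod.snd) = some "$," ∨
          token = "``" ∨ token = "(" ∨ token = "/" ∨
          (rest.head?.map Prod.fst) = some "''" ∨ (rest.head?.map Prod.fst) = some ")" ∨
          (rest.head?.map Prod.fst) = some "/" ∨ (rest.head?.map Prod.fst) = none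
      · simp only [sftLoop, if_pos c]
        rw [ih (out ++ token), ih ("" ++ token)]
        simp [String.append_assoc, List.map_map, Function.comp]
        refine ⟨by omega, ?_⟩
        intro a b _
        omega
      · simp only [sftLoop, if_neg c]
        rw [ih (out ++ token ++ " "), ih ("" ++ token ++ " ")]
        simp [String.append_assoc, List.map_map, Function.comp]
        refine ⟨by omega, ?_⟩
        intro a b _
        omega

-- B's inner pass computes A's sentence (as parts), its length bump, and A's spans shifted by o
lemma altInner_spec (z : List (String × String)) : ∀ (o : Int),
    PySem.Str.join "" (altInner z o).1 = (sftLoop z "" []).2 ∧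
    (altInner z o).2.1 = o + PySem.Str.len (sftLoop z "" []).2 ∧
    (altInner z o).2.2 = (sftLoop z "" []).1.map (fun s => (s.1 + o, s.2 + o)) := by
  induction z with
  | nil => intro o; simp [altInner_nil, sftLoop, joinE_nil]
  | cons hd rest ih =>
      intro o
      obtain ⟨token, pos⟩ := hd
      cases rest with
      | nil =>
          rw [altInner_single, sftLoop_single]
          simp [joinE_cons, joinE_nil,
            String.empty_append, String.append_empty]
          omega
      | cons hd2 rest2 =>
          obtain ⟨nt, np⟩ := hd2
          rw [altInner_cons_cons, sftLoop_cons_cons]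
          by_cases c : np = "$." ∨ np = "$," ∨ token = "``" ∨ token = "(" ∨ token = "/" ∨
              nt = "''" ∨ nt = ")" ∨ nt = "/"
          · rw [if_pos c, if_pos c]
            obtain ⟨ih1, ih2, ih3⟩ := ih (o + PySem.Str.len token)
            rw [sftLoop_shift ((nt, np) :: rest2) ("" ++ token)]
            refine ⟨?_, ?_, ?_⟩
            · rw [joinE_cons, ih1]
              simp [String.empty_append]
            · rw [ih2]
              simp [String.empty_append]
              omega
            · rw [ih3]
              simp [String.empty_append, List.map_map,
                Function.comp]
              refine ⟨by omega, ?_⟩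
              intro a b _
              omega
          · rw [if_neg c, if_neg c]
            obtain ⟨ih1, ih2, ih3⟩ := ih (o + PySem.Str.len token + 1)
            rw [sftLoop_shift ((nt, np) :: rest2) ("" ++ token ++ " ")]
            refine ⟨?_, ?_, ?_⟩
            · rw [joinE_cons, joinE_cons, ih1]
              simp [String.empty_append, String.append_assoc]
            · rw [ih2]
              simp [String.empty_append]
              omega
            · rw [ih3]
              simp [String.empty_append,
                List.map_map, Function.comp]
              refine ⟨by omega, ?_⟩
              intro a b _
              omega

-- B's outer loop, started with parts joining to text and offset = len text, computes A's loop
lemma altOuter_spec (pairs : List (List String × List String)) :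
    ∀ (text : String) (parts : List String) (tl : List (List (Int × Int))),
    PySem.Str.join "" parts = text →
    (PySem.Str.join "" (altOuter pairs parts (PySem.Str.len text) tl).1,
     (altOuter pairs parts (PySem.Str.len text) tl).2) = tftLoop pairs text tl := by
  induction pairs with
  | nil => intro text parts tl hj; simp [altOuter, tftLoop, hj]
  | cons hd rest ih =>
      intro text parts tl hj
      obtain ⟨st, sp⟩ := hd
      by_cases h : text = ""
      · subst h
        obtain ⟨i1, i2, i3⟩ := altInner_spec (st.zip sp) 0
        rw [len_empty]
        simp only [altOuter, tftLoop, sentence_from_tokens,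
          if_neg (show ¬ ((0:Int) > 0) by omega)]
        have e0 : (if PySem.Str.len "" ≠ 0 then (1:Int) else 0) = 0 := by
          rw [len_empty]; norm_num
        rw [e0]
        have e0' : (if (0:Int) = 1 then " " else "") = "" := by norm_num
        rw [e0']
        have htext : ("" ++ "" ++ (sftLoop (st.zip sp) "" []).2) =
            (sftLoop (st.zip sp) "" []).2 := by
          simp [String.empty_append]
        rw [htext]
        have hoff : (altInner (st.zip sp) 0).2.1 =
            PySem.Str.len (sftLoop (st.zip sp) "" []).2 := by
          rw [i2, zero_add]
        rw [hoff]
        rw [ih _ _ _ (by rw [joinE_append, hj, i1, String.empty_append])]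
        congr 2
        rw [i3]
        exact congrArg (fun x => [x]) (List.map_congr_left (fun s _ => by
          simp only [Prod.mk.injEq, len_empty]; omega))
      · have hne : text.length ≠ 0 := fun hh => h (String.length_eq_zero_iff.mp hh)
        have hne' : text.toList.length ≠ 0 := by rw [String.length_toList]; exact hne
        have hp : PySem.Str.len text > 0 := by rw [PySem.Str.len_eq]; omega
        have hnz : PySem.Str.len text ≠ 0 := by omega
        obtain ⟨i1, i2, i3⟩ := altInner_spec (st.zip sp) (PySem.Str.len text + 1)
        simp only [altOuter, tftLoop, sentence_from_tokens, if_pos hp]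
        have e1 : (if PySem.Str.len text ≠ 0 then (1:Int) else 0) = 1 := if_pos hnz
        rw [e1]
        have e1' : (if (1:Int) = 1 then " " else "") = " " := by norm_num
        rw [e1']
        have hoff : (altInner (st.zip sp) (PySem.Str.len text + 1)).2.1 =
            PySem.Str.len (text ++ " " ++ (sftLoop (st.zip sp) "" []).2) := by
          rw [i2]
          simp []
          omega
        rw [hoff]
        rw [ih _ _ _ (by
          rw [joinE_append, joinE_append, hj, i1, joinE_cons, joinE_nil]
          simp [String.append_assoc, String.append_empty])]
        congr 2
        rw [i3]
        exact congrArg (fun x => [x]) (List.map_congr_left (fun s _ => by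
          simp only [Prod.mk.injEq]; omega))

-- ===== VERDICT (by name: the statement is the Claim_ definition above) =====
theorem text_from_tokens_spec : Claim_equal_text_from_tokens := by
  intro sentences pos_lists _hdom _hpre
  unfold Spec_text_from_tokens text_from_tokens text_from_tokens_alt
  have h := altOuter_spec (sentences.zip pos_lists) "" [] [] joinE_nil
  rw [len_empty] at h
  exact h.symm
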